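-- pv_equiv track=rewrite | github.com/chiralcentre/Kattis | sliderpuzzle.py | solve
-- ===== SOURCE A (Python) =====
-- def solve(puzzle,n):
--     L = len(puzzle)
--     visited = [False for _ in range(L)]
--     frontier = [0]
--     visited[0] = True
--     while frontier:
--         u = frontier.pop()
--         m = puzzle[u]
--         if m == 0:
--             return f"Puzzle {n} is solvable."
--         if u - m in range(L) and not visited[u - m]:
--             frontier.append(u - m)
--             visited[u - m] = True
--         if u + m in range(L) and not visited[u + m]:
--             frontier.append(u + m)
--             visited[u + m] = True
--     return f"Puzzle {n} is not solvable."
-- ===== SOURCE B (Python) =====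
-- def solve(puzzle, n):
--     L = len(puzzle)
--     reach = [0]
--     for _ in range(L):
--         nxt = list(reach)
--         for u in reach:
--             m = puzzle[u]
--             for v in (u - m, u + m):
--                 if 0 <= v < L and v not in nxt:
--                     nxt.append(v)
--         reach = nxt
--     if any(puzzle[u] == 0 for u in reach):
--         return f"Puzzle {n} is solvable."
--     return f"Puzzle {n} is not solvable."
-- ===== Notes on version B (the rewrite author's own statement) =====
-- stated objective: alternative
-- what changed: Replaces the explicit-stack DFS with an early return by a round-based saturation: L rounds each expand the whole known reachable set by one step, then a single scan checks it for a 0-valued cell.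
import Mathlib
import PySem

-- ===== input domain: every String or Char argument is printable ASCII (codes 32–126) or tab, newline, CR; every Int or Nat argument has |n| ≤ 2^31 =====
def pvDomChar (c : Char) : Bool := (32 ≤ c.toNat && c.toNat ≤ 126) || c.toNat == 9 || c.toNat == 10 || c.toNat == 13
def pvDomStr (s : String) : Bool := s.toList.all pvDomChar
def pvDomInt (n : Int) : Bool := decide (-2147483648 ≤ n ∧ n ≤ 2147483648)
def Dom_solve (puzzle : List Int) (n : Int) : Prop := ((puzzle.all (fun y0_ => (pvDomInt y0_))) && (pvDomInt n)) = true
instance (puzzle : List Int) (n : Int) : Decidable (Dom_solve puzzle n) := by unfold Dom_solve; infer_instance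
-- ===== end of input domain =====

-- B replaces A's explicit-stack DFS with round-based saturation of the reachable set
-- (alternative decomposition, not claimed faster); equal return value on nonempty puzzles.

-- ===== PORT A =====
def pvSolvStr (n : Int) : String := "Puzzle " ++ PySem.Int.toStr n ++ " is solvable."
def pvNotStr (n : Int) : String := "Puzzle " ++ PySem.Int.toStr n ++ " is not solvable."

-- one conditional discover-and-push block of A ('if v in range(L) and not visited[v]: …')
def pvPush (puzzle : List Int) (st : List Int × List Bool) (v : Int) : List Int × List Bool :=
  if 0 ≤ v ∧ v < (puzzle.length : Int) ∧ st.2.getD v.toNat true = false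
  then (st.1 ++ [v], st.2.set v.toNat true) else st

-- termination helpers for the while-loop (cited below)
theorem pv_count_set_true (w : List Bool) (i : Nat) (h : w.getD i true = false) :
    (w.set i true).count false + 1 = w.count false := by
  induction w generalizing i with
  | nil => simp [List.getD] at h
  | cons b t ih =>
    cases i with
    | zero => simp [List.getD] at h; subst h; simp
    | succ j =>
      have := ih j (by simpa [List.getD] using h)
      simp [List.count_cons, List.set]
      omega

theorem pvPush_measure (puzzle : List Int) (st : List Int × List Bool) (v : Int) :
    2 * (pvPush puzzle st v).2.count false + (pvPush puzzle st v).1.length ≤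
      2 * st.2.count false + st.1.length := by
  unfold pvPush
  split
  · rename_i h
    have := pv_count_set_true st.2 v.toNat h.2.2
    simp
    omega
  · exact le_refl _

-- the 'while frontier:' loop of A; frontier.pop() takes the last element
def solveLoop (puzzle : List Int) (n : Int) (visited : List Bool) (frontier : List Int) : String :=
  if hf : frontier = [] then pvNotStr n
  else
    let u := frontier.getLast hf
    let m := (PySem.List.pyGet? puzzle u).getD 0
    if m = 0 then pvSolvStr n
    else
      let st := pvPush puzzle (pvPush puzzle (frontier.dropLast, visited) (u - m)) (u + m)
      solveLoop puzzle n st.2 st.1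
termination_by 2 * visited.count false + frontier.length
decreasing_by
  have h1 := pvPush_measure puzzle
    (pvPush puzzle (frontier.dropLast, visited)
      (frontier.getLast hf - (PySem.List.pyGet? puzzle (frontier.getLast hf)).getD 0))
    (frontier.getLast hf + (PySem.List.pyGet? puzzle (frontier.getLast hf)).getD 0)
  have h2 := pvPush_measure puzzle (frontier.dropLast, visited)
    (frontier.getLast hf - (PySem.List.pyGet? puzzle (frontier.getLast hf)).getD 0)
  have h4 : 0 < frontier.length := List.length_pos_of_ne_nil hf
  have h3 : frontier.dropLast.length + 1 = frontier.length := by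
    simp [List.length_dropLast]; omega
  simp only [] at h1 h2 ⊢
  omega

def solve (puzzle : List Int) (n : Int) : String :=
  solveLoop puzzle n ((List.replicate puzzle.length false).set 0 true) [0]

-- ===== PORT B =====
-- one saturation round: extend nxt by every in-range neighbour of every known cell
-- loop body: 'for v in (u - m, u + m): if 0 <= v < L and v not in nxt: nxt.append(v)'
def pvExpandStep (puzzle : List Int) (nxt : List Int) (u : Int) : List Int :=
  let m := (PySem.List.pyGet? puzzle u).getD 0
  let nxt1 := if 0 ≤ u - m ∧ u - m < (puzzle.length : Int) ∧ (u - m) ∉ nxt then nxt ++ [u - m] else nxt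
  if 0 ≤ u + m ∧ u + m < (puzzle.length : Int) ∧ (u + m) ∉ nxt1 then nxt1 ++ [u + m] else nxt1

def pvExpand (puzzle : List Int) (reach : List Int) : List Int :=
  reach.foldl (pvExpandStep puzzle) reach

def solve_alt (puzzle : List Int) (n : Int) : String :=
  let reach := (List.range puzzle.length).foldl (fun r _ => pvExpand puzzle r) [0]
  if reach.any (fun u => ((PySem.List.pyGet? puzzle u).getD 0) == 0)
  then pvSolvStr n else pvNotStr n

-- ===== PRECONDITION & SPEC =====
-- Pre_ excludes only the empty puzzle, on which A raises IndexError (visited[0] = True).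
def Pre_solve (puzzle : List Int) (n : Int) : Prop := puzzle ≠ []
instance (puzzle : List Int) (n : Int) : Decidable (Pre_solve puzzle n) := by unfold Pre_solve; infer_instance
def pvWitness_solve : List Int × Int := ([1, 0], 7)

def Spec_solve (puzzle : List Int) (n : Int) (out : String) : Prop := out = solve_alt puzzle n
instance (puzzle : List Int) (n : Int) (out : String) : Decidable (Spec_solve puzzle n out) := by unfold Spec_solve; infer_instance

-- ===== CLAIM (what is proved, stated in full; the proofs are below) =====
def Claim_equal_solve : Prop := ∀ (puzzle : List Int) (n : Int), Dom_solve puzzle n → Pre_solve puzzle n → Spec_solve puzzle n (solve puzzle n)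

-- ===== LEMMAS AND PROOFS =====

-- reachability vocabulary shared by both correctness proofs
def pvM (puzzle : List Int) (u : Int) : Int := (PySem.List.pyGet? puzzle u).getD 0
def pvIn (puzzle : List Int) (u : Int) : Prop := 0 ≤ u ∧ u < (puzzle.length : Int)
def pvStep (puzzle : List Int) (u v : Int) : Prop :=
  pvIn puzzle u ∧ pvIn puzzle v ∧ (v = u - pvM puzzle u ∨ v = u + pvM puzzle u)
def pvReach (puzzle : List Int) : Int → Prop := Relation.ReflTransGen (pvStep puzzle) 0
def pvSolvable (puzzle : List Int) : Prop :=
  ∃ u, pvReach puzzle u ∧ pvIn puzzle u ∧ pvM puzzle u = 0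

def pvVis (visited : List Bool) (u : Int) : Prop := visited.getD u.toNat false = true

def pvInv (puzzle : List Int) (visited : List Bool) (frontier : List Int) : Prop :=
  visited.length = puzzle.length ∧
  pvVis visited 0 ∧
  (∀ u ∈ frontier, pvIn puzzle u ∧ pvVis visited u) ∧
  (∀ u, pvIn puzzle u → pvVis visited u → pvReach puzzle u) ∧
  (∀ u, pvIn puzzle u → pvVis visited u → u ∉ frontier →
     pvM puzzle u ≠ 0 ∧ ∀ v, pvStep puzzle u v → pvVis visited v)

theorem pv_getD_set_bool (l : List Bool) (i : Nat) (b : Bool) (j : Nat) (d : Bool) :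
    (l.set i b).getD j d = if i = j ∧ i < l.length then b else l.getD j d := by
  simp only [List.getD_eq_getElem?_getD, List.getElem?_set]
  by_cases hij : i = j
  · subst hij
    by_cases hl : i < l.length
    · simp [hl]
    · simp [hl]
  · simp [hij]

theorem pvPush_spec (puzzle : List Int) (f : List Int) (w : List Bool) (v : Int)
    (hlen : w.length = puzzle.length) :
    (pvPush puzzle (f, w) v).2.length = w.length ∧
    (∀ x : Int, 0 ≤ x → (pvVis (pvPush puzzle (f, w) v).2 x ↔ pvVis w x ∨ (x = v ∧ pvIn puzzle v))) ∧
    (∀ x : Int, x ∈ (pvPush puzzle (f, w) v).1 ↔ x ∈ f ∨ (x = v ∧ ¬ pvVis w v ∧ pvIn puzzle v)) := by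
  by_cases hg : 0 ≤ v ∧ v < (puzzle.length : Int) ∧ w.getD v.toNat true = false
  · have hvlt : v.toNat < w.length := by
      by_contra hc
      rw [List.getD_eq_default _ _ (by omega)] at hg
      exact absurd hg.2.2 (by simp)
    have hin : pvIn puzzle v := ⟨hg.1, hg.2.1⟩
    have hnv : ¬ pvVis w v := by
      unfold pvVis
      rw [List.getD_eq_getElem _ _ hvlt]
      rw [List.getD_eq_getElem _ _ hvlt] at hg
      simp [hg.2.2]
    simp only [pvPush, if_pos hg]
    refine ⟨by simp, ?_, ?_⟩
    · intro x hx
      by_cases hxv : x = v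
      · subst hxv
        unfold pvVis
        rw [pv_getD_set_bool]
        simp [hvlt]
        exact Or.inr hin
      · have hne : v.toNat ≠ x.toNat := by omega
        unfold pvVis
        rw [pv_getD_set_bool]
        simp [hne, hxv]
    · intro x
      simp only [List.mem_append, List.mem_singleton]
      constructor
      · rintro (h | h)
        · exact Or.inl h
        · exact Or.inr ⟨h, hnv, hin⟩
      · rintro (h | ⟨h, -, -⟩)
        · exact Or.inl h
        · exact Or.inr h
  · have himp : ∀ x : Int, x = v → pvIn puzzle v → pvVis w x := by
      rintro x rfl ⟨h0, hL⟩
      have hvlt : x.toNat < w.length := by omega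
      have : w.getD x.toNat true = true := by
        rcases Bool.eq_false_or_eq_true (w.getD x.toNat true) with h | h
        · exact h
        · exact absurd ⟨h0, hL, h⟩ hg
      unfold pvVis
      rw [List.getD_eq_getElem _ _ hvlt]
      rw [List.getD_eq_getElem _ _ hvlt] at this
      exact this
    simp only [pvPush, if_neg hg]
    refine ⟨by simp, ?_, ?_⟩
    · intro x hx
      constructor
      · exact Or.inl
      · rintro (h | ⟨rfl, hin⟩)
        · exact h
        · exact himp _ rfl hin
    · intro x
      constructor
      · exact Or.inl
      · rintro (h | ⟨rfl, hnv, hin⟩)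
        · exact h
        · exact absurd (himp _ rfl hin) hnv

theorem pvInv_step (puzzle : List Int) (visited : List Bool) (frontier : List Int)
    (hf : frontier ≠ []) (u m : Int) (hu : u = frontier.getLast hf)
    (hmdef : m = pvM puzzle u) (hm : m ≠ 0) (hinv : pvInv puzzle visited frontier) :
    pvInv puzzle (pvPush puzzle (pvPush puzzle (frontier.dropLast, visited) (u - m)) (u + m)).2
      (pvPush puzzle (pvPush puzzle (frontier.dropLast, visited) (u - m)) (u + m)).1 := by
  obtain ⟨hlen, h0, hfr, hreach, hclosed⟩ := hinv
  obtain ⟨len1, vis1, mem1⟩ := pvPush_spec puzzle frontier.dropLast visited (u - m) hlen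
  obtain ⟨len2, vis2, mem2⟩ :=
    pvPush_spec puzzle (pvPush puzzle (frontier.dropLast, visited) (u - m)).1
      (pvPush puzzle (frontier.dropLast, visited) (u - m)).2 (u + m)
      (by rw [len1, hlen])
  have humem : u ∈ frontier := hu ▸ List.getLast_mem hf
  obtain ⟨huin, huvis⟩ := hfr u humem
  have hureach : pvReach puzzle u := hreach u huin huvis
  have hsplit : frontier.dropLast ++ [u] = frontier := hu ▸ List.dropLast_append_getLast hf
  -- combined visited characterisation
  have visIff : ∀ x : Int, 0 ≤ x →
      (pvVis (pvPush puzzle (pvPush puzzle (frontier.dropLast, visited) (u - m)) (u + m)).2 x ↔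
        pvVis visited x ∨ (x = u - m ∧ pvIn puzzle (u - m)) ∨ (x = u + m ∧ pvIn puzzle (u + m))) := by
    intro x hx
    rw [vis2 x hx, vis1 x hx]
    tauto
  have memIff : ∀ x : Int,
      x ∈ (pvPush puzzle (pvPush puzzle (frontier.dropLast, visited) (u - m)) (u + m)).1 ↔
        x ∈ frontier.dropLast ∨
        (x = u - m ∧ ¬ pvVis visited (u - m) ∧ pvIn puzzle (u - m)) ∨
        (x = u + m ∧ ¬ pvVis (pvPush puzzle (frontier.dropLast, visited) (u - m)).2 (u + m) ∧
          pvIn puzzle (u + m)) := by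
    intro x
    rw [mem2 x, mem1 x]
    tauto
  have mono : ∀ x : Int, 0 ≤ x → pvVis visited x →
      pvVis (pvPush puzzle (pvPush puzzle (frontier.dropLast, visited) (u - m)) (u + m)).2 x :=
    fun x hx hv => (visIff x hx).mpr (Or.inl hv)
  have hstep1 : pvIn puzzle (u - m) → pvStep puzzle u (u - m) :=
    fun hin => ⟨huin, hin, Or.inl (by rw [hmdef])⟩
  have hstep2 : pvIn puzzle (u + m) → pvStep puzzle u (u + m) :=
    fun hin => ⟨huin, hin, Or.inr (by rw [hmdef])⟩
  refine ⟨by rw [len2, len1, hlen], mono 0 le_rfl h0, ?_, ?_, ?_⟩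
  · -- frontier elements are in range and visited
    intro x hx
    rcases (memIff x).mp hx with h | ⟨rfl, -, hin⟩ | ⟨rfl, -, hin⟩
    · obtain ⟨hin, hv⟩ := hfr x (List.dropLast_subset _ h)
      exact ⟨hin, mono x hin.1 hv⟩
    · exact ⟨hin, (visIff _ hin.1).mpr (Or.inr (Or.inl ⟨rfl, hin⟩))⟩
    · exact ⟨hin, (visIff _ hin.1).mpr (Or.inr (Or.inr ⟨rfl, hin⟩))⟩
  · -- visited implies reachable
    intro x hin hv
    rcases (visIff x hin.1).mp hv with h | ⟨rfl, hin'⟩ | ⟨rfl, hin'⟩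
    · exact hreach x hin h
    · exact hureach.tail (hstep1 hin')
    · exact hureach.tail (hstep2 hin')
  · -- visited, not in frontier: expanded
    intro x hin hv hnf
    have hdl : x ∉ frontier.dropLast := fun hc => hnf ((memIff x).mpr (Or.inl hc))
    have hvold : pvVis visited x := by
      rcases (visIff x hin.1).mp hv with h | ⟨hx1, hin1⟩ | ⟨hx2, hin2⟩
      · exact h
      · -- x = u - m: the push guard must have failed, so it was already visited
        by_cases hvv : pvVis visited (u - m)
        · exact hx1 ▸ hvv
        · exact absurd ((memIff x).mpr (Or.inr (Or.inl ⟨hx1, hvv, hin1⟩))) hnf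
      · by_cases hvv : pvVis (pvPush puzzle (frontier.dropLast, visited) (u - m)).2 (u + m)
        · rcases (vis1 (u + m) (hx2 ▸ hin.1)).mp hvv with h | ⟨heq, hin1⟩
          · exact hx2 ▸ h
          · by_cases hvv1 : pvVis visited (u - m)
            · exact (hx2.trans heq) ▸ hvv1
            · exact absurd ((memIff x).mpr
                (Or.inr (Or.inl ⟨hx2.trans heq, hvv1, hin1⟩))) hnf
        · exact absurd ((memIff x).mpr (Or.inr (Or.inr ⟨hx2, hvv, hin2⟩))) hnf
    by_cases hxu : x = u
    · subst hxu
      refine ⟨hmdef ▸ hm, ?_⟩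
      intro v hs
      rcases hs.2.2 with h | h
      · exact (visIff v hs.2.1.1).mpr (Or.inr (Or.inl ⟨hmdef ▸ h, hmdef ▸ h ▸ hs.2.1⟩))
      · exact (visIff v hs.2.1.1).mpr (Or.inr (Or.inr ⟨hmdef ▸ h, hmdef ▸ h ▸ hs.2.1⟩))
    · have hnf' : x ∉ frontier := by
        rw [← hsplit]
        simp [hdl, hxu]
      obtain ⟨hne, hcl⟩ := hclosed x hin hvold hnf'
      exact ⟨hne, fun v hs => mono v hs.2.1.1 (hcl v hs)⟩

theorem pvLoop_correct (puzzle : List Int) (n : Int) (visited : List Bool) (frontier : List Int)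
    (hinv : pvInv puzzle visited frontier) :
    (pvSolvable puzzle ∧ solveLoop puzzle n visited frontier = pvSolvStr n) ∨
    (¬ pvSolvable puzzle ∧ solveLoop puzzle n visited frontier = pvNotStr n) := by
  revert hinv
  induction visited, frontier using solveLoop.induct puzzle with
  | case1 visited =>
    intro hinv
    obtain ⟨hlen, h0, hfr, hreach, hclosed⟩ := hinv
    right
    refine ⟨?_, by simp [solveLoop]⟩
    rintro ⟨x, hr, hin, hm⟩
    have hv : ∀ y : Int, pvReach puzzle y → pvVis visited y := by
      intro y hy
      induction hy with
      | refl => exact h0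
      | tail hab hbc ih => exact (hclosed _ hbc.1 ih (by simp)).2 _ hbc
    exact (hclosed x hin (hv x hr) (by simp)).1 hm
  | case2 visited frontier hf u m hm =>
    intro hinv
    obtain ⟨hlen, h0, hfr, hreach, hclosed⟩ := hinv
    left
    constructor
    · obtain ⟨hin, hv⟩ := hfr _ (List.getLast_mem hf)
      exact ⟨_, hreach _ hin hv, hin, hm⟩
    · rw [solveLoop]
      simp [hf]
      intro h
      exact absurd hm h
  | case3 visited frontier hf u m hm st ih =>
    intro hinv
    have hinv' := pvInv_step puzzle visited frontier hf _ _ rfl rfl hm hinv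
    have := ih hinv'
    rw [solveLoop]
    rw [dif_neg hf, if_neg hm]
    exact this

def pvIter (puzzle : List Int) : Nat → List Int
  | 0 => [0]
  | k + 1 => pvExpand puzzle (pvIter puzzle k)

theorem pv_mem_expandStep (puzzle : List Int) (nxt : List Int) (u x : Int) :
    x ∈ pvExpandStep puzzle nxt u ↔
      x ∈ nxt ∨ (pvIn puzzle x ∧ (x = u - pvM puzzle u ∨ x = u + pvM puzzle u)) := by
  unfold pvExpandStep pvIn pvM
  dsimp only
  set m := (PySem.List.pyGet? puzzle u).getD 0 with hmdef
  split_ifs with h1 h2 h2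
  · simp only [List.mem_append, List.mem_singleton]
    constructor
    · rintro ((hx | rfl) | rfl)
      · exact Or.inl hx
      · exact Or.inr ⟨⟨h1.1, h1.2.1⟩, Or.inl rfl⟩
      · exact Or.inr ⟨⟨h2.1, h2.2.1⟩, Or.inr rfl⟩
    · rintro (hx | ⟨hin, rfl | rfl⟩)
      · exact Or.inl (Or.inl hx)
      · exact Or.inl (Or.inr rfl)
      · exact Or.inr rfl
  · simp only [List.mem_append, List.mem_singleton]
    constructor
    · rintro (hx | rfl)
      · exact Or.inl hx
      · exact Or.inr ⟨⟨h1.1, h1.2.1⟩, Or.inl rfl⟩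
    · rintro (hx | ⟨hin, rfl | rfl⟩)
      · exact Or.inl hx
      · exact Or.inr rfl
      · by_contra hcc
        rw [not_or] at hcc
        exact h2 ⟨hin.1, hin.2, by simp [List.mem_append, hcc.1, hcc.2]⟩
  · simp only [List.mem_append, List.mem_singleton]
    constructor
    · rintro (hx | rfl)
      · exact Or.inl hx
      · exact Or.inr ⟨⟨h2.1, h2.2.1⟩, Or.inr rfl⟩
    · rintro (hx | ⟨hin, rfl | rfl⟩)
      · exact Or.inl hx
      · refine Or.inl ?_
        by_contra hcc
        exact h1 ⟨hin.1, hin.2, hcc⟩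
      · exact Or.inr rfl
  · constructor
    · exact Or.inl
    · rintro (hx | ⟨hin, rfl | rfl⟩)
      · exact hx
      · by_contra hcc
        exact h1 ⟨hin.1, hin.2, hcc⟩
      · by_contra hcc
        exact h2 ⟨hin.1, hin.2, hcc⟩

theorem pv_mem_foldl_expandStep (puzzle : List Int) (l : List Int) (acc : List Int) (x : Int) :
    x ∈ l.foldl (pvExpandStep puzzle) acc ↔
      x ∈ acc ∨ ∃ u ∈ l, pvIn puzzle x ∧ (x = u - pvM puzzle u ∨ x = u + pvM puzzle u) := by
  induction l generalizing acc with
  | nil => simp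
  | cons a t ih =>
    simp only [List.foldl_cons, ih, pv_mem_expandStep, List.mem_cons]
    constructor
    · rintro ((h | h) | ⟨u, hu, hc⟩)
      · exact Or.inl h
      · exact Or.inr ⟨a, Or.inl rfl, h⟩
      · exact Or.inr ⟨u, Or.inr hu, hc⟩
    · rintro (h | ⟨u, rfl | hu, hc⟩)
      · exact Or.inl (Or.inl h)
      · exact Or.inl (Or.inr hc)
      · exact Or.inr ⟨u, hu, hc⟩

theorem pv_mem_expand (puzzle : List Int) (r : List Int) (x : Int) :
    x ∈ pvExpand puzzle r ↔
      x ∈ r ∨ ∃ u ∈ r, pvIn puzzle x ∧ (x = u - pvM puzzle u ∨ x = u + pvM puzzle u) :=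
  pv_mem_foldl_expandStep puzzle r r x

theorem pv_expandStep_prefix (puzzle : List Int) (nxt : List Int) (u : Int) :
    ∃ t, pvExpandStep puzzle nxt u = nxt ++ t := by
  unfold pvExpandStep
  dsimp only
  split_ifs <;> [exact ⟨_, (List.append_assoc _ _ _)⟩; exact ⟨_, rfl⟩; exact ⟨_, rfl⟩;
    exact ⟨[], (List.append_nil _).symm⟩]

theorem pv_foldl_expandStep_prefix (puzzle : List Int) (l : List Int) (acc : List Int) :
    ∃ t, l.foldl (pvExpandStep puzzle) acc = acc ++ t := by
  induction l generalizing acc with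
  | nil => exact ⟨[], (List.append_nil _).symm⟩
  | cons a t ih =>
    obtain ⟨t1, h1⟩ := pv_expandStep_prefix puzzle acc a
    obtain ⟨t2, h2⟩ := ih (pvExpandStep puzzle acc a)
    refine ⟨t1 ++ t2, ?_⟩
    rw [List.foldl_cons, h1]
    rw [h1] at h2
    rw [h2, List.append_assoc]

theorem pv_expand_prefix (puzzle : List Int) (r : List Int) :
    ∃ t, pvExpand puzzle r = r ++ t :=
  pv_foldl_expandStep_prefix puzzle r r

theorem pv_expandStep_nodup (puzzle : List Int) (nxt : List Int) (u : Int)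
    (h : nxt.Nodup) : (pvExpandStep puzzle nxt u).Nodup := by
  unfold pvExpandStep
  dsimp only
  split_ifs with h1 h2 h2
  · rw [← List.concat_eq_append]
    exact List.Nodup.concat h2.2.2
      (by rw [← List.concat_eq_append]; exact List.Nodup.concat h1.2.2 h)
  · rw [← List.concat_eq_append]
    exact List.Nodup.concat h1.2.2 h
  · rw [← List.concat_eq_append]
    exact List.Nodup.concat h2.2.2 h
  · exact h

theorem pv_expand_nodup (puzzle : List Int) (r : List Int) (h : r.Nodup) :
    (pvExpand puzzle r).Nodup := by
  have aux : ∀ (l acc : List Int), acc.Nodup → (l.foldl (pvExpandStep puzzle) acc).Nodup := by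
    intro l
    induction l with
    | nil => intro acc hacc; exact hacc
    | cons a t ih => intro acc hacc; exact ih _ (pv_expandStep_nodup puzzle acc a hacc)
  exact aux r r h

theorem pvIter_eq_foldl (puzzle : List Int) (k : Nat) :
    (List.range k).foldl (fun r _ => pvExpand puzzle r) [0] = pvIter puzzle k := by
  induction k with
  | zero => rfl
  | succ j ih => simp [List.range_succ, List.foldl_append, ih, pvIter]

theorem pvIter_subset (puzzle : List Int) {k j : Nat} (h : k ≤ j) :
    pvIter puzzle k ⊆ pvIter puzzle j := by
  induction j with
  | zero => simp [Nat.le_zero.mp h]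
  | succ i ih =>
    rcases Nat.lt_or_ge k (i + 1) with hk | hk
    · intro x hx
      obtain ⟨t, ht⟩ := pv_expand_prefix puzzle (pvIter puzzle i)
      have : x ∈ pvIter puzzle i := ih (Nat.lt_succ_iff.mp hk) hx
      show x ∈ pvExpand puzzle (pvIter puzzle i)
      rw [ht]
      exact List.mem_append_left _ this
    · have : k = i + 1 := le_antisymm h hk
      subst this
      exact fun x hx => hx

theorem pvIter_sound (puzzle : List Int) (hp : puzzle ≠ []) (k : Nat) :
    ∀ x ∈ pvIter puzzle k, pvReach puzzle x ∧ pvIn puzzle x := by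
  induction k with
  | zero =>
    intro x hx
    rw [pvIter, List.mem_singleton] at hx
    subst hx
    refine ⟨Relation.ReflTransGen.refl, le_rfl, ?_⟩
    have := List.length_pos_of_ne_nil hp
    exact_mod_cast this
  | succ j ih =>
    intro x hx
    rcases (pv_mem_expand puzzle (pvIter puzzle j) x).mp hx with h | ⟨u, hu, hin, hc⟩
    · exact ih x h
    · obtain ⟨hru, hiu⟩ := ih u hu
      exact ⟨hru.tail ⟨hiu, hin, hc⟩, hin⟩

theorem pvIter_nodup (puzzle : List Int) (k : Nat) : (pvIter puzzle k).Nodup := by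
  induction k with
  | zero => simp [pvIter]
  | succ j ih => exact pv_expand_nodup puzzle _ ih

theorem pv_nodup_inrange_len (puzzle : List Int) (l : List Int) (hn : l.Nodup)
    (hin : ∀ x ∈ l, pvIn puzzle x) : l.length ≤ puzzle.length := by
  have hmn : (l.map Int.toNat).Nodup := by
    refine List.Nodup.map_on ?_ hn
    intro x hx y hy hxy
    have h1 := (hin x hx).1
    have h2 := (hin y hy).1
    omega
  have hsub : (l.map Int.toNat) ⊆ List.range puzzle.length := by
    intro a ha
    rw [List.mem_map] at ha
    obtain ⟨x, hx, rfl⟩ := ha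
    obtain ⟨h1, h2⟩ := hin x hx
    rw [List.mem_range]
    omega
  have h1 : (l.map Int.toNat).toFinset.card = (l.map Int.toNat).length :=
    List.toFinset_card_of_nodup hmn
  have h2 : (l.map Int.toNat).toFinset ⊆ (List.range puzzle.length).toFinset := by
    intro a ha
    rw [List.mem_toFinset] at *
    exact hsub ha
  have h3 := Finset.card_le_card h2
  have h4 := (List.range puzzle.length).toFinset_card_le
  have h5 : (l.map Int.toNat).length = l.length := List.length_map ..
  have h6 : (List.range puzzle.length).length = puzzle.length := List.length_range ..
  omega

theorem pvIter_fix_propagates (puzzle : List Int) (k : Nat)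
    (hfix : pvExpand puzzle (pvIter puzzle k) = pvIter puzzle k) :
    ∀ i, pvIter puzzle (k + i) = pvIter puzzle k := by
  intro i
  induction i with
  | zero => rfl
  | succ j ih => rw [← Nat.add_assoc, pvIter, ih, hfix]

theorem pvIter_fix (puzzle : List Int) (hp : puzzle ≠ []) :
    pvExpand puzzle (pvIter puzzle puzzle.length) = pvIter puzzle puzzle.length := by
  by_cases hex : ∃ k < puzzle.length, pvExpand puzzle (pvIter puzzle k) = pvIter puzzle k
  · obtain ⟨k, hk, hfix⟩ := hex
    have h1 : pvIter puzzle puzzle.length = pvIter puzzle k := by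
      have := pvIter_fix_propagates puzzle k hfix (puzzle.length - k)
      rwa [Nat.add_sub_cancel' (Nat.le_of_lt hk)] at this
    rw [h1, hfix]
  · rw [not_exists] at hex
    exfalso
    have grow : ∀ k, k ≤ puzzle.length → k + 1 ≤ (pvIter puzzle k).length := by
      intro k
      induction k with
      | zero => intro _; simp [pvIter]
      | succ j ih =>
        intro hj
        have hlj := ih (Nat.le_of_succ_le hj)
        have hne : pvExpand puzzle (pvIter puzzle j) ≠ pvIter puzzle j :=
          fun he => hex j ⟨Nat.lt_of_succ_le hj, he⟩
        obtain ⟨t, ht⟩ := pv_expand_prefix puzzle (pvIter puzzle j)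
        have htne : t ≠ [] := by
          rintro rfl
          exact hne (by rw [ht, List.append_nil])
        have : (pvIter puzzle (j + 1)).length = (pvIter puzzle j).length + t.length := by
          rw [pvIter, ht, List.length_append]
        have := List.length_pos_of_ne_nil htne
        omega
    have h1 := grow puzzle.length le_rfl
    have h2 := pv_nodup_inrange_len puzzle (pvIter puzzle puzzle.length)
      (pvIter_nodup puzzle _) (fun x hx => (pvIter_sound puzzle hp _ x hx).2)
    omega

theorem pvIter_complete (puzzle : List Int) (hp : puzzle ≠ []) (x : Int)
    (hr : pvReach puzzle x) : x ∈ pvIter puzzle puzzle.length := by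
  induction hr with
  | refl => exact pvIter_subset puzzle (Nat.zero_le _) (by simp [pvIter])
  | tail hab hbc ih =>
    rw [← pvIter_fix puzzle hp]
    exact (pv_mem_expand puzzle _ _).mpr (Or.inr ⟨_, ih, hbc.2.1, hbc.2.2⟩)

theorem pvAlt_correct (puzzle : List Int) (n : Int) (hp : puzzle ≠ []) :
    (pvSolvable puzzle ∧ solve_alt puzzle n = pvSolvStr n) ∨
    (¬ pvSolvable puzzle ∧ solve_alt puzzle n = pvNotStr n) := by
  have hiter := pvIter_eq_foldl puzzle puzzle.length
  by_cases hs : pvSolvable puzzle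
  · left
    refine ⟨hs, ?_⟩
    obtain ⟨u, hr, hin, hm⟩ := hs
    have hu : u ∈ pvIter puzzle puzzle.length := pvIter_complete puzzle hp u hr
    have hany : ((pvIter puzzle puzzle.length).any
        (fun u => ((PySem.List.pyGet? puzzle u).getD 0) == 0)) = true := by
      rw [List.any_eq_true]
      exact ⟨u, hu, by simpa [pvM] using hm⟩
    unfold solve_alt
    rw [hiter, if_pos hany]
  · right
    refine ⟨hs, ?_⟩
    have hany : ((pvIter puzzle puzzle.length).any
        (fun u => ((PySem.List.pyGet? puzzle u).getD 0) == 0)) = false := by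
      rw [List.any_eq_false]
      rintro u hu hc
      obtain ⟨hr, hin⟩ := pvIter_sound puzzle hp _ u hu
      exact hs ⟨u, hr, hin, by simpa [pvM] using hc⟩
    unfold solve_alt
    rw [hiter, if_neg (by simp [hany])]

-- ===== VERDICT (by name: the statement is the Claim_ definition above) =====
theorem solve_spec : Claim_equal_solve := by
  intro puzzle n _ hpre
  unfold Spec_solve
  have hL : 0 < puzzle.length := List.length_pos_of_ne_nil hpre
  have hvis0 : pvVis ((List.replicate puzzle.length false).set 0 true) 0 := by
    unfold pvVis
    rw [pv_getD_set_bool]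
    simp [hL]
  have hvis_only : ∀ x : Int, 0 ≤ x →
      pvVis ((List.replicate puzzle.length false).set 0 true) x → x = 0 := by
    intro x hx hv
    unfold pvVis at hv
    rw [pv_getD_set_bool] at hv
    by_contra hne
    have hxt : x.toNat ≠ 0 := by omega
    rw [if_neg (fun hc => hxt hc.1.symm)] at hv
    rcases Nat.lt_or_ge x.toNat puzzle.length with hlt | hge
    · rw [List.getD_eq_getElem _ _ (by simpa using hlt)] at hv
      simp at hv
    · rw [List.getD_eq_default _ _ (by simpa using hge)] at hv
      exact absurd hv (by simp)
  have hinit : pvInv puzzle ((List.replicate puzzle.length false).set 0 true) [0] := by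
    refine ⟨by simp, hvis0, ?_, ?_, ?_⟩
    · intro u hu
      rw [List.mem_singleton] at hu
      subst hu
      exact ⟨⟨le_refl 0, by exact_mod_cast hL⟩, hvis0⟩
    · intro u hin hv
      have := hvis_only u hin.1 hv
      subst this
      exact Relation.ReflTransGen.refl
    · intro u hin hv hnf
      have := hvis_only u hin.1 hv
      subst this
      simp at hnf
  rcases pvLoop_correct puzzle n _ _ hinit with ⟨hs, hA⟩ | ⟨hs, hA⟩ <;>
    rcases pvAlt_correct puzzle n hpre with ⟨hs', hB⟩ | ⟨hs', hB⟩
  · unfold solve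
    rw [hA, hB]
  · exact absurd hs hs'
  · exact absurd hs' hs
  · unfold solve
    rw [hA, hB]
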